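-- pv_equiv track=rewrite | github.com/Dirac-Robot/beacon | beacon/parser.py | parse_backtick_string
-- ===== SOURCE A (Python) =====
-- def parse_backtick_string(command, i):
--     assert command[i] == '`'
--     start = i
--     i += 1
--     value = ['`']
--     length = len(command)
--     nesting_level = 1
--     while i < length:
--         c = command[i]
--         if c == '\\' and i+1 < length:
--             # 이스케이프된 문자 처리
--             value.append(c)
--             value.append(command[i+1])
--             i += 2
--         elif c == '`':
--             value.append(c)
--             i += 1
--             if i < length and command[i] == '`':
--                 # 연속된 백틱은 단일 백틱으로 처리
--                 value.append(command[i])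
--                 i += 1
--             else:
--                 nesting_level -= 1
--                 if nesting_level == 0:
--                     break
--         elif c == '`':
--             value.append(c)
--             nesting_level += 1
--             i += 1
--         else:
--             value.append(c)
--             i += 1
--     return ''.join(value), i
-- ===== SOURCE B (Python) =====
-- def parse_backtick_string(command, i):
--     # Requires a valid non-negative index pointing at a backtick.
--     assert 0 <= i < len(command) and command[i] == '`'
--     n = len(command)
--
--     def end(j):
--         # index just past the token, scanning from j
--         if j >= n:
--             return j
--         c = command[j]
--         if c == '\\' and j + 1 < n:
--             return end(j + 2)
--         if c == '`':
--             if j + 1 < n and command[j + 1] == '`':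
--                 return end(j + 2)
--             return j + 1
--         return end(j + 1)
--
--     j = end(i + 1)
--     return command[i:j], j
-- ===== Notes on version B (the rewrite author's own statement) =====
-- stated objective: simpler
-- what changed: B replaces A's iterative character-accumulator loop (appending each char to a list and joining) by a recursive end-index scanner plus a single slice command[i:j]; Pre_ excludes negative and out-of-range i, where A's negative-index wraparound is accidental and B's index assert raises.
-- outside the precondition, e.g. on parse_backtick_string('`', -1): A returns ('``', 1), B raises AssertionError
import Mathlib
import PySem

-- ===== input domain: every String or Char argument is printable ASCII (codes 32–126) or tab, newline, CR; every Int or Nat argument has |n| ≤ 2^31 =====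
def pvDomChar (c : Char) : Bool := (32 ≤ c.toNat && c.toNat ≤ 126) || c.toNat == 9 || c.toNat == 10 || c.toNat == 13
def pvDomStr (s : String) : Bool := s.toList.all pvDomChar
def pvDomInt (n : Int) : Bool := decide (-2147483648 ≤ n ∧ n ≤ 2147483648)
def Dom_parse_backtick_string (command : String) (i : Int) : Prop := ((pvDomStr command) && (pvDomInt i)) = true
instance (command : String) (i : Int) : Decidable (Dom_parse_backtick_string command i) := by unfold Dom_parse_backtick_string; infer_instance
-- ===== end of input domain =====

-- B replaces A's character-accumulator loop by a recursive end-index scan plus one slice (simpler; return value only).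


-- ===== PORT A =====
-- A's while loop: value accumulator, index i, nesting_level; fuel bounds the recursion
-- (cs.length is enough: every iteration advances i by ≥ 1 and the loop starts at i+1 ≥ 1).
def pvLoopA (cs : List Char) (n : Int) : Nat → List Char → Int → Int → List Char × Int
  | 0, value, i, _ => (value, i)
  | fuel+1, value, i, nesting =>
    if i < n then
      match PySem.List.pyGet? cs i with
      | none => (value, i)                         -- unreachable for 0 ≤ i < n
      | some c =>
        if c = '\\' ∧ i + 1 < n then
          match PySem.List.pyGet? cs (i+1) with
          | none => (value, i)                     -- unreachable: i+1 < n
          | some c2 => pvLoopA cs n fuel (value ++ [c, c2]) (i+2) nesting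
        else if c = '`' then
          if i + 1 < n ∧ PySem.List.pyGet? cs (i+1) = some '`' then
            pvLoopA cs n fuel (value ++ [c, '`']) (i+2) nesting
          else if nesting - 1 = 0 then (value ++ [c], i+1)
          else pvLoopA cs n fuel (value ++ [c]) (i+1) (nesting - 1)
        else pvLoopA cs n fuel (value ++ [c]) (i+1) nesting
    else (value, i)

def parse_backtick_string (command : String) (i : Int) : String × Int :=
  let cs := command.toList
  if PySem.List.pyGet? cs i = some '`' then        -- assert command[i] == '`'
    let r := pvLoopA cs (cs.length : Int) cs.length ['`'] (i+1) 1
    (String.ofList r.1, r.2)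
  else (String.ofList [], i)                           -- assert failure / IndexError: outside Pre_

-- ===== PORT B =====
-- B's recursive end-index scanner: returns the index just past the token.
def pvEndB (cs : List Char) (n : Int) : Nat → Int → Int
  | 0, j => j
  | fuel+1, j =>
    if j < n then
      match PySem.List.pyGet? cs j with
      | none => j                                  -- unreachable for 0 ≤ j < n
      | some c =>
        if c = '\\' ∧ j + 1 < n then pvEndB cs n fuel (j+2)
        else if c = '`' then
          if j + 1 < n ∧ PySem.List.pyGet? cs (j+1) = some '`' then pvEndB cs n fuel (j+2)
          else j + 1
        else pvEndB cs n fuel (j+1)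
    else j

def parse_backtick_string_alt (command : String) (i : Int) : String × Int :=
  let cs := command.toList
  if 0 ≤ i ∧ i < (cs.length : Int) ∧ PySem.List.pyGet? cs i = some '`' then
    let j := pvEndB cs (cs.length : Int) cs.length (i+1)
    (String.ofList (PySem.List.slice cs (some i) (some j)), j)
  else (String.ofList [], i)                           -- assert failure: outside Pre_

-- ===== PRECONDITION & SPEC =====
-- Pre_ excludes negative i (where A returns a value by Python's accidental negative-index
-- wraparound while B's index assert raises) and out-of-range i (where both raise).
def Pre_parse_backtick_string (command : String) (i : Int) : Prop :=
  0 ≤ i ∧ i < (command.toList.length : Int) ∧ PySem.List.pyGet? command.toList i = some '`'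
instance (command : String) (i : Int) : Decidable (Pre_parse_backtick_string command i) := by
  unfold Pre_parse_backtick_string; infer_instance

def pvWitness_parse_backtick_string : String × Int := ("`a\\`b``c`x", 0)

def Spec_parse_backtick_string (command : String) (i : Int) (out : String × Int) : Prop := out = parse_backtick_string_alt command i
instance (command : String) (i : Int) (out : String × Int) : Decidable (Spec_parse_backtick_string command i out) := by unfold Spec_parse_backtick_string; infer_instance

-- ===== CLAIM (what is proved, stated in full; the proofs are below) =====
def Claim_equal_parse_backtick_string : Prop := ∀ (command : String) (i : Int), Dom_parse_backtick_string command i → Pre_parse_backtick_string command i → Spec_parse_backtick_string command i (parse_backtick_string command i)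

-- ===== LEMMAS AND PROOFS =====

lemma pvEndB_ge (cs : List Char) (n : Int) : ∀ (fuel : Nat) (j : Int), j ≤ pvEndB cs n fuel j := by
  intro fuel
  induction fuel with
  | zero => intro j; simp [pvEndB]
  | succ f ih =>
    intro j
    simp only [pvEndB]
    by_cases h1 : j < n
    · rw [if_pos h1]
      cases h : PySem.List.pyGet? cs j with
      | none => exact le_refl j
      | some c =>
        dsimp only
        by_cases h2 : c = '\\' ∧ j + 1 < n
        · rw [if_pos h2]; have := ih (j+2); omega
        · rw [if_neg h2]
          by_cases h3 : c = '`'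
          · rw [if_pos h3]
            by_cases h4 : j + 1 < n ∧ PySem.List.pyGet? cs (j+1) = some '`'
            · rw [if_pos h4]; have := ih (j+2); omega
            · rw [if_neg h4]; omega
          · rw [if_neg h3]; have := ih (j+1); omega
    · rw [if_neg h1]

lemma slice_cons (cs : List Char) (i j : Int) (h0 : 0 ≤ i) (hn : i < (cs.length : Int)) (hij : i + 1 ≤ j) :
    (cs.drop i.toNat).take (j - i).toNat
      = cs[i.toNat]'(by omega) :: (cs.drop (i+1).toNat).take (j - (i+1)).toNat := by
  rw [List.drop_eq_getElem_cons (by omega)]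
  have h1 : (j - i).toNat = ((j - (i+1)).toNat) + 1 := by omega
  have h2 : (i+1).toNat = i.toNat + 1 := by omega
  rw [h1, h2, List.take_succ_cons]

lemma pvLockstep (cs : List Char) : ∀ (fuel : Nat) (i : Int) (value : List Char), 0 ≤ i →
    pvLoopA cs (cs.length : Int) fuel value i 1
      = (value ++ (cs.drop i.toNat).take (pvEndB cs (cs.length : Int) fuel i - i).toNat,
         pvEndB cs (cs.length : Int) fuel i) := by
  intro fuel
  induction fuel with
  | zero => intro i value h0; simp [pvLoopA, pvEndB]
  | succ f ih =>
    intro i value h0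
    simp only [pvLoopA, pvEndB]
    by_cases h1 : i < (cs.length : Int)
    · rw [if_pos h1, if_pos h1]
      rw [PySem.List.pyGet?_eq_some_getElem cs h0 h1]
      dsimp only
      by_cases h2 : cs[i.toNat]'(by omega) = '\\' ∧ i + 1 < (cs.length : Int)
      · -- escape: consumes two characters
        rw [if_pos h2, if_pos h2]
        rw [PySem.List.pyGet?_eq_some_getElem cs (by omega) h2.2]
        dsimp only
        rw [ih (i+2) _ (by omega)]
        have hge := pvEndB_ge cs (cs.length : Int) f (i+2)
        rw [slice_cons cs i _ h0 h1 (by omega),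
            slice_cons cs (i+1) _ (by omega) h2.2 (by omega)]
        have he : (i+1+1) = i+2 := by ring
        simp [he, h2.1]
      · rw [if_neg h2, if_neg h2]
        by_cases h3 : cs[i.toNat]'(by omega) = '`'
        · rw [if_pos h3, if_pos h3]
          by_cases h4 : i + 1 < (cs.length : Int) ∧ PySem.List.pyGet? cs (i+1) = some '`'
          · -- doubled backtick: consumes two characters
            rw [if_pos h4, if_pos h4]
            rw [ih (i+2) _ (by omega)]
            have hge := pvEndB_ge cs (cs.length : Int) f (i+2)
            have hc2 : cs[(i+1).toNat]'(by omega) = '`' := by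
              have hg := PySem.List.pyGet?_eq_some_getElem (xs := cs) (i := i+1) (by omega) h4.1
              rw [hg] at h4; injection h4.2
            rw [slice_cons cs i _ h0 h1 (by omega),
                slice_cons cs (i+1) _ (by omega) h4.1 (by omega)]
            have he : (i+1+1) = i+2 := by ring
            simp [he, h3, hc2]
          · -- closing backtick: nesting 1 - 1 = 0, break
            rw [if_neg h4, if_neg h4]
            rw [if_pos (show (1:Int) - 1 = 0 by norm_num)]
            rw [slice_cons cs i (i+1) h0 h1 (by omega)]
            simp [h3]
        · -- ordinary character
          rw [if_neg h3, if_neg h3]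
          rw [ih (i+1) _ (by omega)]
          have hge := pvEndB_ge cs (cs.length : Int) f (i+1)
          rw [slice_cons cs i _ h0 h1 (by omega)]
          simp
    · rw [if_neg h1, if_neg h1]
      simp

-- ===== VERDICT (by name: the statement is the Claim_ definition above) =====
theorem parse_backtick_string_spec : Claim_equal_parse_backtick_string := by
  intro command i _hdom hpre
  obtain ⟨h0, hn, hc⟩ := hpre
  unfold Spec_parse_backtick_string parse_backtick_string parse_backtick_string_alt
  simp only [hc, if_pos, h0, hn, and_true]
  set cs := command.toList with hcs
  have hj := pvEndB_ge cs (cs.length : Int) cs.length (i+1)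
  rw [pvLockstep cs cs.length (i+1) ['`'] (by omega)]
  rw [PySem.List.slice_toNat cs h0 (by omega)]
  have ht : cs[i.toNat]'(by omega) = '`' := by
    have hg := PySem.List.pyGet?_eq_some_getElem (xs := cs) (i := i) h0 hn
    rw [hg] at hc; injection hc
  have : (pvEndB cs (↑cs.length) cs.length (i+1)).toNat - i.toNat
       = (pvEndB cs (↑cs.length) cs.length (i+1) - i).toNat := by omega
  rw [this, slice_cons cs i _ h0 hn (by omega), ht]
  simp
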